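-- pv_equiv track=rewrite | github.com/d-krupke/CheckMyTex | web_app/helpers.py | find_main_tex_in_dict
-- ===== SOURCE A (Python) =====
-- def find_main_tex_in_dict(file_dict: dict[str, str]) -> str | None:
--     """Find the main .tex file from provided mapping."""
--     common_names = [
--         "main.tex",
--         "document.tex",
--         "thesis.tex",
--         "paper.tex",
--         "report.tex",
--     ]
--
--     for name in common_names:
--         for filename in file_dict:
--             if filename.endswith(f"/{name}") or filename == name:
--                 return filename
--
--     for filename, content in file_dict.items():
--         if filename.endswith(".tex") and "\\documentclass" in content:
--             return filename
--
--     for filename in file_dict: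
--         if filename.endswith(".tex"):
--             return filename
--
--     return None
-- ===== SOURCE B (Python) =====
-- def find_main_tex_in_dict(file_dict: dict[str, str]) -> str | None:
--     """Find the main .tex file from provided mapping (single pass)."""
--     common_names = [
--         "main.tex",
--         "document.tex",
--         "thesis.tex",
--         "paper.tex",
--         "report.tex",
--     ]
--     best_idx = None
--     best_name = None
--     doc_candidate = None
--     first_tex = None
--     for filename, content in file_dict.items():
--         for i, name in enumerate(common_names):
--             if filename == name or filename.endswith("/" + name):
--                 if best_idx is None or i < best_idx:
--                     best_idx = i
--                     best_name = filename
--                 break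
--         if filename.endswith(".tex"):
--             if first_tex is None:
--                 first_tex = filename
--             if doc_candidate is None and "\\documentclass" in content:
--                 doc_candidate = filename
--     if best_name is not None:
--         return best_name
--     if doc_candidate is not None:
--         return doc_candidate
--     return first_tex
-- ===== Notes on version B (the rewrite author's own statement) =====
-- stated objective: alternative
-- what changed: replaces A's up-to-seven sequential scans (one per common name plus two fallback scans) by a single pass over the dict that maintains the best common-name match by smallest name index (earliest entry on ties), the first .tex with \documentclass, and the first .tex
import Mathlib
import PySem

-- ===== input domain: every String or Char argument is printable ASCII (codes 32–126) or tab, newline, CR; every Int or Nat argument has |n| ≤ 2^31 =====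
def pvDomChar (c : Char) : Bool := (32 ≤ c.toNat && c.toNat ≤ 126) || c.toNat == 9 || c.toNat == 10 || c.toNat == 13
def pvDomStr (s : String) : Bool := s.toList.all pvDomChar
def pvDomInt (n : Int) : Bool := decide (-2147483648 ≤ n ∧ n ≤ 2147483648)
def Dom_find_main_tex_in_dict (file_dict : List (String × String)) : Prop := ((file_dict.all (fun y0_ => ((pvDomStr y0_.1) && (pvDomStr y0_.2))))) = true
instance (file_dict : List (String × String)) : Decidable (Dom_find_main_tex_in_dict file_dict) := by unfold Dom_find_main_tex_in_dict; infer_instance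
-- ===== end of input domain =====

-- B replaces A's up-to-seven sequential scans over the dict by a single pass keeping the
-- best common-name match (smallest name index, earliest entry on ties), the first .tex with
-- \documentclass, and the first .tex; same return value, no side effects.

-- ===== PORT A =====
-- literal port of A: for each common name in order, scan the dict for the first filename
-- matching it; then scan for the first .tex containing \documentclass; then the first .tex.
def find_main_tex_in_dict (file_dict : List (String × String)) : Option String :=
  match ["main.tex", "document.tex", "thesis.tex", "paper.tex", "report.tex"].findSome? (fun name =>
      (file_dict.find? (fun p => PySem.Str.endswith p.1 ("/" ++ name) || p.1 == name)).map (fun p => p.1)) with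
  | some f => some f
  | none =>
    match file_dict.find? (fun p => PySem.Str.endswith p.1 ".tex" && PySem.Str.isIn "\\documentclass" p.2) with
    | some p => some p.1
    | none =>
      match file_dict.find? (fun p => PySem.Str.endswith p.1 ".tex") with
      | some p => some p.1
      | none => none

-- ===== PORT B =====
-- one fold step of B's single loop; the inner `for i, name in enumerate(...)` with `break`
-- is the first match in the enumerated name list (List.find? over PySem.List.enumerate).
def pvBStep (st : Option Int × Option String × Option String × Option String)
    (p : String × String) : Option Int × Option String × Option String × Option String :=
  let (bi, bn, dc, ft) := st
  let (bi, bn) :=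
    match (PySem.List.enumerate ["main.tex", "document.tex", "thesis.tex", "paper.tex", "report.tex"] 0).find?
        (fun q => p.1 == q.2 || PySem.Str.endswith p.1 ("/" ++ q.2)) with
    | none => (bi, bn)
    | some q =>
      match bi with
      | none => (some q.1, some p.1)
      | some b => if q.1 < b then (some q.1, some p.1) else (bi, bn)
  if PySem.Str.endswith p.1 ".tex" then
    let ft := match ft with | none => some p.1 | some _ => ft
    let dc := if dc.isNone && PySem.Str.isIn "\\documentclass" p.2 then some p.1 else dc
    (bi, bn, dc, ft)
  else (bi, bn, dc, ft)

def find_main_tex_in_dict_alt (file_dict : List (String × String)) : Option String :=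
  let (_, bn, dc, ft) := file_dict.foldl pvBStep (none, none, none, none)
  match bn with
  | some f => some f
  | none =>
    match dc with
    | some f => some f
    | none => ft

-- ===== PRECONDITION & SPEC =====
def Spec_find_main_tex_in_dict (file_dict : List (String × String)) (out : Option String) : Prop := out = find_main_tex_in_dict_alt file_dict
instance (file_dict : List (String × String)) (out : Option String) : Decidable (Spec_find_main_tex_in_dict file_dict out) := by unfold Spec_find_main_tex_in_dict; infer_instance

-- ===== CLAIM (what is proved, stated in full; the proofs are below) =====
def Claim_equal_find_main_tex_in_dict : Prop := ∀ (file_dict : List (String × String)), Dom_find_main_tex_in_dict file_dict → Spec_find_main_tex_in_dict file_dict (find_main_tex_in_dict file_dict)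

-- ===== LEMMAS AND PROOFS =====

-- proof-side vocabulary
def pvNames : List String := ["main.tex", "document.tex", "thesis.tex", "paper.tex", "report.tex"]

-- first matching name index among an enumerated name list (what B's inner loop computes)
def pvMi (ens : List (Int × String)) (fn : String) : Option Int :=
  (ens.find? (fun q => fn == q.2 || PySem.Str.endswith fn ("/" ++ q.2))).map (fun q => q.1)

-- merge of two optional (index, filename) candidates, left-biased on ties
def pvM (a b : Option (Int × String)) : Option (Int × String) :=
  match a, b with
  | none, _ => b
  | some _, none => a
  | some x, some y => if y.1 < x.1 then b else a

-- the best (smallest-index, earliest-entry) common-name match of the whole list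
def pvCanon (ens : List (Int × String)) : List (String × String) → Option (Int × String)
  | [] => none
  | p :: d => pvM ((pvMi ens p.1).map (fun i => (i, p.1))) (pvCanon ens d)

def pvP2 (d : List (String × String)) : Option String :=
  (d.find? (fun p => PySem.Str.endswith p.1 ".tex" && PySem.Str.isIn "\\documentclass" p.2)).map (fun p => p.1)

def pvP3 (d : List (String × String)) : Option String :=
  (d.find? (fun p => PySem.Str.endswith p.1 ".tex")).map (fun p => p.1)

theorem pvM_assoc (a b c : Option (Int × String)) : pvM (pvM a b) c = pvM a (pvM b c) := by
  cases a with
  | none => rfl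
  | some x =>
    cases b with
    | none => rfl
    | some y =>
      cases c with
      | none => by_cases h : y.1 < x.1 <;> simp [pvM, h]
      | some z =>
        by_cases h1 : y.1 < x.1 <;> by_cases h2 : z.1 < y.1 <;> simp [pvM, h1, h2] <;>
          first
          | rfl
          | (intro hcon; exfalso; omega)

theorem pvMi_lower (ns : List String) (k : Int) (fn : String) (i : Int)
    (h : pvMi (PySem.List.enumerate ns k) fn = some i) : k ≤ i := by
  induction ns generalizing k with
  | nil => simp [pvMi, PySem.List.enumerate] at h
  | cons n ns ih =>
    rw [PySem.List.enumerate_cons] at h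
    unfold pvMi at h
    rw [List.find?_cons] at h
    split at h
    · simp at h; omega
    · have := ih (k + 1) h; omega

theorem pvCanon_lower (ns : List String) (k : Int) (d : List (String × String)) (y : Int × String)
    (h : pvCanon (PySem.List.enumerate ns k) d = some y) : k ≤ y.1 := by
  obtain ⟨y1, y2⟩ := y
  induction d generalizing y1 y2 with
  | nil => simp [pvCanon] at h
  | cons p d ih =>
    unfold pvCanon at h
    cases hm : pvMi (PySem.List.enumerate ns k) p.1 with
    | none =>
      rw [hm] at h
      exact ih y1 y2 h
    | some i =>
      have hi := pvMi_lower ns k p.1 i hm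
      rw [hm] at h
      cases hc : pvCanon (PySem.List.enumerate ns k) d with
      | none =>
        rw [hc] at h
        simp [pvM] at h
        obtain ⟨h1, h2⟩ := h
        omega
      | some z =>
        rw [hc] at h
        by_cases hlt : z.1 < i
        · simp [pvM, hlt] at h
          obtain ⟨z1, z2⟩ := z
          simp at h
          obtain ⟨h1, h2⟩ := h
          have := ih z1 z2 hc
          omega
        · simp [pvM, hlt] at h
          obtain ⟨h1, h2⟩ := h
          omega

theorem pvMi_cons (n : String) (ns : List String) (k : Int) (fn : String) :
    pvMi (PySem.List.enumerate (n :: ns) k) fn =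
      if PySem.Str.endswith fn ("/" ++ n) || fn == n then some k
      else pvMi (PySem.List.enumerate ns (k + 1)) fn := by
  rw [PySem.List.enumerate_cons]
  unfold pvMi
  rw [List.find?_cons]
  by_cases h : fn == n
  · simp [h]
  · simp only [h, Bool.or_false, Bool.false_or]
    cases he : PySem.Str.endswith fn ("/" ++ n) <;> simp [he]

-- peeling one common name off the canonical best match
theorem pvCanon_cons_name (n : String) (ns : List String) (k : Int) (d : List (String × String)) :
    pvCanon (PySem.List.enumerate (n :: ns) k) d =
      match d.find? (fun p => PySem.Str.endswith p.1 ("/" ++ n) || p.1 == n) with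
      | some p => some (k, p.1)
      | none => pvCanon (PySem.List.enumerate ns (k + 1)) d := by
  induction d with
  | nil => rfl
  | cons p d ih =>
    show pvM ((pvMi (PySem.List.enumerate (n :: ns) k) p.1).map (fun i => (i, p.1)))
        (pvCanon (PySem.List.enumerate (n :: ns) k) d) = _
    rw [pvMi_cons, ih]
    by_cases hp : (PySem.Str.endswith p.1 ("/" ++ n) || p.1 == n) = true
    · rw [if_pos hp, List.find?_cons_of_pos (p := fun p => PySem.Str.endswith p.1 ("/" ++ n) || p.1 == n) (a := p) (l := d) hp]
      cases hf : d.find? (fun p => PySem.Str.endswith p.1 ("/" ++ n) || p.1 == n) with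
      | some q =>
        show pvM (some (k, p.1)) (some (k, q.1)) = some (k, p.1)
        simp [pvM]
      | none =>
        cases hc : pvCanon (PySem.List.enumerate ns (k + 1)) d with
        | none => rfl
        | some y =>
          have hy := pvCanon_lower ns (k + 1) d y hc
          show pvM (some (k, p.1)) (some y) = some (k, p.1)
          show (if y.1 < k then some y else some (k, p.1)) = some (k, p.1)
          rw [if_neg (by omega)]
    · rw [if_neg hp, List.find?_cons_of_neg (p := fun p => PySem.Str.endswith p.1 ("/" ++ n) || p.1 == n) (a := p) (l := d) (by simpa using hp)]
      cases hf : d.find? (fun p => PySem.Str.endswith p.1 ("/" ++ n) || p.1 == n) with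
      | some q =>
        cases hm : pvMi (PySem.List.enumerate ns (k + 1)) p.1 with
        | none => rfl
        | some i =>
          have hi := pvMi_lower ns (k + 1) p.1 i hm
          show pvM (some (i, p.1)) (some (k, q.1)) = some (k, q.1)
          show (if k < i then some (k, q.1) else some (i, p.1)) = some (k, q.1)
          rw [if_pos (by omega)]
      | none =>
        rfl

-- A's first phase (the nested name loops) equals the canonical best match B keeps
theorem pvPh1_eq (ns : List String) (k : Int) (d : List (String × String)) :
    ns.findSome? (fun name =>
        (d.find? (fun p => PySem.Str.endswith p.1 ("/" ++ name) || p.1 == name)).map (fun p => p.1))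
      = (pvCanon (PySem.List.enumerate ns k) d).map (fun x => x.2) := by
  induction ns generalizing k with
  | nil =>
    rw [PySem.List.enumerate_nil]
    have hnil : ∀ d', pvCanon ([] : List (Int × String)) d' = none := by
      intro d'
      induction d' with
      | nil => rfl
      | cons q d' ih2 =>
        show pvM ((pvMi [] q.1).map (fun i => (i, q.1))) (pvCanon [] d') = none
        rw [ih2]
        rfl
    rw [hnil d]
    rfl
  | cons n ns ih =>
    rw [List.findSome?_cons, pvCanon_cons_name]
    cases hf : d.find? (fun p => PySem.Str.endswith p.1 ("/" ++ n) || p.1 == n) with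
    | some q => rfl
    | none => exact ih (k + 1)

-- B's fold, run from an arbitrary (coupled) state, in closed form
theorem pvFold_eq (d : List (String × String)) (a : Option (Int × String)) (dc ft : Option String) :
    d.foldl pvBStep (a.map (fun x => x.1), a.map (fun x => x.2), dc, ft)
      = ((pvM a (pvCanon (PySem.List.enumerate pvNames 0) d)).map (fun x => x.1),
         (pvM a (pvCanon (PySem.List.enumerate pvNames 0) d)).map (fun x => x.2),
         dc.or (pvP2 d), ft.or (pvP3 d)) := by
  induction d generalizing a dc ft with
  | nil => cases a <;> cases dc <;> cases ft <;> simp [pvM, pvCanon, pvP2, pvP3]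
  | cons p d ih =>
    rw [List.foldl_cons]
    have hstep : pvBStep (a.map (fun x => x.1), a.map (fun x => x.2), dc, ft) p
        = ((pvM a ((pvMi (PySem.List.enumerate pvNames 0) p.1).map (fun i => (i, p.1)))).map (fun x => x.1),
           (pvM a ((pvMi (PySem.List.enumerate pvNames 0) p.1).map (fun i => (i, p.1)))).map (fun x => x.2),
           dc.or (if PySem.Str.endswith p.1 ".tex" && PySem.Str.isIn "\\documentclass" p.2 then some p.1 else none),
           ft.or (if PySem.Str.endswith p.1 ".tex" then some p.1 else none)) := by
      unfold pvBStep pvMi pvNames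
      cases hf : (PySem.List.enumerate ["main.tex", "document.tex", "thesis.tex", "paper.tex", "report.tex"] 0).find?
          (fun q => p.1 == q.2 || PySem.Str.endswith p.1 ("/" ++ q.2)) with
      | none =>
        cases a <;> cases dc <;> cases ft <;>
          cases ht : PySem.Str.endswith p.1 ".tex" <;>
          simp [hf, pvM, ht] <;>
          cases hi : PySem.Str.isIn "\\documentclass" p.2 <;> simp [hi]
      | some q =>
        cases a with
        | none =>
          cases dc <;> cases ft <;>
            cases ht : PySem.Str.endswith p.1 ".tex" <;>
            simp [hf, pvM, ht] <;>
            cases hi : PySem.Str.isIn "\\documentclass" p.2 <;> simp [hi]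
        | some x =>
          by_cases hlt : q.1 < x.1 <;>
            cases dc <;> cases ft <;>
            cases ht : PySem.Str.endswith p.1 ".tex" <;>
            simp [hf, pvM, ht, hlt] <;>
            cases hi : PySem.Str.isIn "\\documentclass" p.2 <;> simp [hi]
    rw [hstep, ih]
    have hcanon : pvCanon (PySem.List.enumerate pvNames 0) (p :: d)
        = pvM ((pvMi (PySem.List.enumerate pvNames 0) p.1).map (fun i => (i, p.1)))
              (pvCanon (PySem.List.enumerate pvNames 0) d) := rfl
    have hp2 : pvP2 (p :: d)
        = (if PySem.Str.endswith p.1 ".tex" && PySem.Str.isIn "\\documentclass" p.2 then some p.1 else none).or (pvP2 d) := by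
      unfold pvP2
      rw [List.find?_cons]
      cases hc : (PySem.Str.endswith p.1 ".tex" && PySem.Str.isIn "\\documentclass" p.2) <;> simp [hc]
    have hp3 : pvP3 (p :: d)
        = (if PySem.Str.endswith p.1 ".tex" then some p.1 else none).or (pvP3 d) := by
      unfold pvP3
      rw [List.find?_cons]
      cases hc : PySem.Str.endswith p.1 ".tex" <;> simp [hc]
    rw [hcanon, ← pvM_assoc, hp2, hp3]
    cases dc <;> cases ft <;> simp [Option.or_assoc]

-- ===== VERDICT (by name: the statement is the Claim_ definition above) =====
theorem find_main_tex_in_dict_spec : Claim_equal_find_main_tex_in_dict := by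
  intro d _
  unfold Spec_find_main_tex_in_dict find_main_tex_in_dict find_main_tex_in_dict_alt
  have hfold := pvFold_eq d none none none
  simp only [Option.map_none, Option.none_or] at hfold
  rw [hfold, show ["main.tex", "document.tex", "thesis.tex", "paper.tex", "report.tex"] = pvNames from rfl,
    pvPh1_eq pvNames 0 d]
  cases hc : pvCanon (PySem.List.enumerate pvNames 0) d with
  | some x => simp [pvM]
  | none =>
    simp only [Option.map_none]
    unfold pvP2 pvP3
    cases h2 : d.find? (fun p => PySem.Str.endswith p.1 ".tex" && PySem.Str.isIn "\\documentclass" p.2) with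
    | some q => simp [pvM]
    | none =>
      simp only [Option.map_none]
      cases h3 : d.find? (fun p => PySem.Str.endswith p.1 ".tex") <;> simp [pvM]
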